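-- pv_equiv track=rewrite | github.com/timurcarstensen/emtp22-ai-turing-tumble | reinforcement_learning/dataset_generators/pretraining_dataset_generation.py | get_valid_coordinates
-- ===== SOURCE A (Python) =====
-- from typing import Tuple, Optional
--
-- def get_new_index(n_bugs: int, coordinate: Tuple[int, int]) -> int:
--     """
--     Gets a coordinate of a CF matrix entry and return its corresponding index in the target label, if
--     the control flow matrix is a lower triangle matrix (waterfall principle).
--
--     :param n_bugs: Number of Bugs
--     :param coordinate: A coordinate (x,y) of a matrix
--     :return: int: Element index if relevant CF matrix entries are sorted line by line
--     """
--
--     c_normal = coordinate[0] * 2 * n_bugs + coordinate[1]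
--     new_index = c_normal
--     for i in range(coordinate[0]):
--         new_index = new_index - (2 * n_bugs - 2 * i)
--     return new_index
--
-- def get_valid_coordinates(n_bugs: int) -> dict:
--     """
--     Returns a dict that maps the new index of a coordinate in the lower triangle matrix
--
--     to the original coordinate
--     :param n_bugs: Number of Bugs
--     :return: dict: Maps the new index of a coordinate in the lower triangle matrix to a valid x,y coordinate pair
--     """
--
--     # a dict containing sorted relevant CF coordinates
--     transformations = dict()
--     for i in range(n_bugs):
--         for j in range(2 * n_bugs):
--             if j >= 2 * i:
--                 continue
--             transformations[get_new_index(n_bugs, (i, j))] = (i, j)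
--     return transformations
-- ===== SOURCE B (Python) =====
-- def get_valid_coordinates(n_bugs: int) -> dict:
--     """Lower-triangle entries enumerated sequentially: the relevant coordinates
--     (i, j) with j < 2*i, read row by row, get consecutive indices 0, 1, 2, ...
--     A running counter replaces the per-entry index recomputation."""
--     transformations = {}
--     index = 0
--     for i in range(n_bugs):
--         for j in range(2 * i):
--             transformations[index] = (i, j)
--             index += 1
--     return transformations
-- ===== Notes on version B (the rewrite author's own statement) =====
-- stated objective: faster
-- what changed: B drops get_new_index entirely and enumerates the lower-triangle coordinates row by row with a running counter (consecutive indices 0,1,2,...), instead of scanning j over range(2*n_bugs) with a skip and recomputing each index by an O(n) subtraction loop.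
import Mathlib
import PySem

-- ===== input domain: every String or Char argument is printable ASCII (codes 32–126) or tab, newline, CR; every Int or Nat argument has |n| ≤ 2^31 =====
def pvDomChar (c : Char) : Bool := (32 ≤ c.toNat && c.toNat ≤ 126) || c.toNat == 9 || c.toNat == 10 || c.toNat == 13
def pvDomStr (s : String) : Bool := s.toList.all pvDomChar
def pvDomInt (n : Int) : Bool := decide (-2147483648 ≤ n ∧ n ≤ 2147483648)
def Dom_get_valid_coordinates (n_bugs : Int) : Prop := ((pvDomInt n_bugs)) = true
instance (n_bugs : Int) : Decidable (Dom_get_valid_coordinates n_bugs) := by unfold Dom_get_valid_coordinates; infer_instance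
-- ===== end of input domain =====

-- B replaces A's per-entry O(n) index recomputation (get_new_index) and the skip-scan over
-- range(2*n_bugs) by a single row-by-row enumeration with a running counter: O(n^2) vs O(n^3).

-- ===== PORT A =====
def get_new_index (n_bugs : Int) (coordinate : Int × Int) : Int :=
  let c_normal := coordinate.1 * 2 * n_bugs + coordinate.2
  (PySem.List.pyRange 0 coordinate.1 1).foldl
    (fun new_index i => new_index - (2 * n_bugs - 2 * i)) c_normal

def get_valid_coordinates (n_bugs : Int) : List (Int × Int × Int) :=
  ((PySem.List.pyRange 0 n_bugs 1).foldl (fun transformations i =>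
      (PySem.List.pyRange 0 (2 * n_bugs) 1).foldl (fun transformations j =>
        if j ≥ 2 * i then transformations
        else transformations.insert (get_new_index n_bugs (i, j)) (i, j))
        transformations)
    (PySem.Dict.empty : PySem.Dict Int (Int × Int))).items

-- ===== PORT B =====
def get_valid_coordinates_alt (n_bugs : Int) : List (Int × Int × Int) :=
  (((PySem.List.pyRange 0 n_bugs 1).foldl (fun (s : PySem.Dict Int (Int × Int) × Int) i =>
      (PySem.List.pyRange 0 (2 * i) 1).foldl
        (fun s j => (s.1.insert s.2 (i, j), s.2 + 1)) s)
    ((PySem.Dict.empty : PySem.Dict Int (Int × Int)), 0)).1).items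

-- ===== PRECONDITION & SPEC =====
def Spec_get_valid_coordinates (n_bugs : Int) (out : List (Int × Int × Int)) : Prop := out = get_valid_coordinates_alt n_bugs
instance (n_bugs : Int) (out : List (Int × Int × Int)) : Decidable (Spec_get_valid_coordinates n_bugs out) := by unfold Spec_get_valid_coordinates; infer_instance

-- ===== CLAIM (what is proved, stated in full; the proofs are below) =====
def Claim_equal_get_valid_coordinates : Prop := ∀ (n_bugs : Int), Dom_get_valid_coordinates n_bugs → Spec_get_valid_coordinates n_bugs (get_valid_coordinates n_bugs)

-- ===== LEMMAS AND PROOFS =====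

-- the row of entries produced for a fixed i, and the whole triangle for 0 ≤ i < m
def pvRow (i : Int) : List (Int × Int × Int) :=
  (PySem.List.pyRange 0 (2 * i) 1).map (fun j => (i * (i - 1) + j, i, j))

def pvTri (m : Int) : List (Int × Int × Int) :=
  (PySem.List.pyRange 0 m 1).flatMap pvRow

theorem pv_foldl_sub (n t : Int) (ht : 0 ≤ t) :
    ∀ acc : Int, (PySem.List.pyRange 0 t 1).foldl
      (fun x i => x - (2 * n - 2 * i)) acc = acc - 2 * n * t + t * (t - 1) := by
  induction t, ht using Int.le_induction with
  | base => intro acc; simp [PySem.List.pyRange_one_eq_nil]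
  | succ t ht ih =>
    intro acc
    rw [PySem.List.pyRange_one_succ_right ht, List.foldl_append, ih]
    simp only [List.foldl_cons, List.foldl_nil]
    ring

theorem pv_get_new_index (n i j : Int) (h : 0 ≤ i) :
    get_new_index n (i, j) = i * (i - 1) + j := by
  show (PySem.List.pyRange 0 i 1).foldl
      (fun x k => x - (2 * n - 2 * k)) (i * 2 * n + j) = i * (i - 1) + j
  rw [pv_foldl_sub n i h]
  ring

theorem pv_enum_range (t : Int) (ht : 0 ≤ t) :
    ∀ c : Int, PySem.List.enumerate (PySem.List.pyRange 0 t 1) c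
      = (PySem.List.pyRange 0 t 1).map (fun j => (c + j, j)) := by
  induction t, ht using Int.le_induction with
  | base => intro c; simp [PySem.List.pyRange_one_eq_nil]
  | succ t ht ih =>
    intro c
    rw [PySem.List.pyRange_one_succ_right ht, PySem.List.enumerate_append, ih,
        List.map_append]
    simp [PySem.List.enumerate, PySem.List.length_pyRange_one]
    omega

-- B's inner loop threads (dict, counter); the counter advances with the position
theorem pv_foldl_pair (i : Int) (l : List Int) :
    ∀ (d : PySem.Dict Int (Int × Int)) (c : Int),
      l.foldl (fun s j => (s.1.insert s.2 (i, j), s.2 + 1)) (d, c)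
        = ((PySem.List.enumerate l c).foldl (fun d p => d.insert p.1 (i, p.2)) d,
           c + l.length) := by
  induction l with
  | nil => intro d c; simp [PySem.List.enumerate]
  | cons x xs ih =>
    intro d c
    simp only [List.foldl_cons, PySem.List.enumerate_cons, ih]
    simp only [Prod.mk.injEq, List.length_cons]
    refine ⟨trivial, by push_cast; ring⟩

theorem pv_key_lt (m : Int) (p : Int × Int × Int) (hp : p ∈ pvTri m) :
    p.1 < m * (m - 1) := by
  unfold pvTri at hp
  rw [List.mem_flatMap] at hp
  obtain ⟨i, hi, hpi⟩ := hp
  rw [PySem.List.mem_pyRange_one] at hi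
  unfold pvRow at hpi
  rw [List.mem_map] at hpi
  obtain ⟨j, hj, rfl⟩ := hpi
  rw [PySem.List.mem_pyRange_one] at hj
  have h1 : i * (i - 1) + j < i * (i + 1) := by nlinarith
  have h2 : i * (i + 1) ≤ m * (m - 1) := by nlinarith
  exact lt_of_lt_of_le h1 h2

theorem pv_fresh (m key : Int) (hk : m * (m - 1) ≤ key) :
    (PySem.Dict.mk (pvTri m) : PySem.Dict Int (Int × Int)).contains key = false := by
  rw [PySem.Dict.contains_mk, List.any_eq_false]
  intro p hp
  have := pv_key_lt m p hp
  simp only [beq_iff_eq]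
  omega

theorem pv_nodup_keys (i c : Int) :
    ((PySem.List.pyRange 0 (2 * i) 1).map (fun j => c + j)).Nodup := by
  apply List.Nodup.map
  · exact fun a b h => by exact add_left_cancel h
  · exact PySem.List.nodup_pyRange_one 0 (2 * i)

-- A's pass over range(2*n) for row i inserts exactly pvRow i
theorem pv_innerA (n i : Int) (h0 : 0 ≤ i) (h1 : i < n)
    (d : PySem.Dict Int (Int × Int))
    (hf : ∀ j, 0 ≤ j → j < 2 * i → d.contains (i * (i - 1) + j) = false) :
    (PySem.List.pyRange 0 (2 * n) 1).foldl (fun d j =>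
        if j ≥ 2 * i then d
        else d.insert (get_new_index n (i, j)) (i, j)) d
      = PySem.Dict.mk (d.items ++ pvRow i) := by
  rw [PySem.List.pyRange_one_append 0 (2 * i) (2 * n) (by omega) (by omega),
      List.foldl_append]
  have hlow : (PySem.List.pyRange 0 (2 * i) 1).foldl (fun d j =>
      if j ≥ 2 * i then d
      else d.insert (get_new_index n (i, j)) (i, j)) d
      = (PySem.List.pyRange 0 (2 * i) 1).foldl (fun d j =>
          d.insert (i * (i - 1) + j) (i, j)) d := by
    apply PySem.List.foldl_congr_mem
    intro acc x hx
    rw [PySem.List.mem_pyRange_one] at hx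
    rw [if_neg (by omega), pv_get_new_index n i x h0]
  rw [hlow]
  have hhigh : ∀ (d' : PySem.Dict Int (Int × Int)),
      (PySem.List.pyRange (2 * i) (2 * n) 1).foldl (fun d j =>
        if j ≥ 2 * i then d
        else d.insert (get_new_index n (i, j)) (i, j)) d' = d' := by
    intro d'
    rw [PySem.List.foldl_congr_mem _ _ (fun acc _ => acc) d'
      (by intro acc x hx
          rw [PySem.List.mem_pyRange_one] at hx
          rw [if_pos (by omega)])]
    simp
  rw [hhigh]
  apply PySem.Dict.ext
  rw [PySem.Dict.items_foldl_insert_fresh (PySem.List.pyRange 0 (2 * i) 1)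
        (fun j => i * (i - 1) + j) (fun j => (i, j)) d
        (by intro a ha
            rw [PySem.List.mem_pyRange_one] at ha
            exact hf a ha.1 ha.2)
        (pv_nodup_keys i (i * (i - 1)))]
  rfl

-- B's pass over range(2*i) from counter c inserts keys c, c+1, …
theorem pv_innerB (i c : Int) (h0 : 0 ≤ i)
    (d : PySem.Dict Int (Int × Int))
    (hf : ∀ j, 0 ≤ j → j < 2 * i → d.contains (c + j) = false) :
    (PySem.List.pyRange 0 (2 * i) 1).foldl
        (fun s j => (s.1.insert s.2 (i, j), s.2 + 1)) (d, c)
      = (PySem.Dict.mk (d.items ++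
          (PySem.List.pyRange 0 (2 * i) 1).map (fun j => (c + j, i, j))), c + 2 * i) := by
  rw [pv_foldl_pair, pv_enum_range (2 * i) (by omega) c, List.foldl_map]
  simp only [Prod.mk.injEq]
  constructor
  · apply PySem.Dict.ext
    rw [PySem.Dict.items_foldl_insert_fresh (PySem.List.pyRange 0 (2 * i) 1)
          (fun j => c + j) (fun j => (i, j)) d
          (by intro a ha
              rw [PySem.List.mem_pyRange_one] at ha
              exact hf a ha.1 ha.2)
          (pv_nodup_keys i c)]
  · rw [PySem.List.length_pyRange_one]
    omega

theorem pvTri_succ (m : Int) (hm : 0 ≤ m) : pvTri (m + 1) = pvTri m ++ pvRow m := by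
  unfold pvTri
  rw [PySem.List.pyRange_one_succ_right hm, List.flatMap_append]
  simp

theorem pv_outerA (n : Int) : ∀ (m : Nat), (m : Int) ≤ n →
    (PySem.List.pyRange 0 m 1).foldl (fun transformations i =>
      (PySem.List.pyRange 0 (2 * n) 1).foldl (fun transformations j =>
        if j ≥ 2 * i then transformations
        else transformations.insert (get_new_index n (i, j)) (i, j))
        transformations)
      (PySem.Dict.empty : PySem.Dict Int (Int × Int))
      = PySem.Dict.mk (pvTri m) := by
  intro m
  induction m with
  | zero => intro _; rfl
  | succ m ih =>
    intro hm
    push_cast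
    push_cast at ih hm
    rw [PySem.List.pyRange_one_succ_right (by positivity), List.foldl_append,
        ih (by omega)]
    simp only [List.foldl_cons, List.foldl_nil]
    rw [pv_innerA n m (by positivity) (by omega) _
        (fun j hj0 hj2 => pv_fresh _ _ (by linarith)),
        pvTri_succ m (by positivity)]

theorem pv_outerB : ∀ (m : Nat),
    (PySem.List.pyRange 0 m 1).foldl (fun (s : PySem.Dict Int (Int × Int) × Int) i =>
      (PySem.List.pyRange 0 (2 * i) 1).foldl
        (fun s j => (s.1.insert s.2 (i, j), s.2 + 1)) s)
      ((PySem.Dict.empty : PySem.Dict Int (Int × Int)), 0)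
      = (PySem.Dict.mk (pvTri m), (m : Int) * (m - 1)) := by
  intro m
  induction m with
  | zero => rfl
  | succ m ih =>
    push_cast
    push_cast at ih
    rw [PySem.List.pyRange_one_succ_right (by positivity), List.foldl_append, ih]
    simp only [List.foldl_cons, List.foldl_nil]
    rw [pv_innerB m ((m : Int) * (m - 1)) (by positivity) _
        (fun j hj0 hj2 => pv_fresh _ _ (by linarith)),
        pvTri_succ m (by positivity)]
    simp only [Prod.mk.injEq]
    exact ⟨rfl, by ring⟩

-- ===== VERDICT (by name: the statement is the Claim_ definition above) =====
theorem get_valid_coordinates_spec : Claim_equal_get_valid_coordinates := by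
  intro n _
  unfold Spec_get_valid_coordinates get_valid_coordinates get_valid_coordinates_alt
  by_cases hn : n ≤ 0
  · rw [PySem.List.pyRange_one_eq_nil hn]
    rfl
  · obtain ⟨m, rfl⟩ : ∃ m : Nat, n = (m : Int) := ⟨n.toNat, by omega⟩
    rw [pv_outerA (m : Int) m le_rfl, pv_outerB m]
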